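-- pv_equiv track=rewrite | github.com/salmanmunaf/Understanding-Mobile-QoE-Under-Low-Memory | video_experiments/Plots/boxplot.py | num_from_right
-- ===== SOURCE A (Python) =====
-- def num_from_right(string):
--     num = 0
--     for i in range(len(string)-1,-1,-1):
--         if string[i] in '. 0123456789':
--             num += 1
--         else:
--             break
--     return num
-- ===== SOURCE B (Python) =====
-- def num_from_right(string):
--     run = 0
--     for c in string:
--         run = run + 1 if c in '. 0123456789' else 0
--     return run
-- ===== Notes on version B (the rewrite author's own statement) =====
-- stated objective: alternative
-- what changed: replaced A's right-to-left index loop with break by a single left-to-right pass that maintains the current run of matching characters and resets it to zero at each non-matching character; the final run length is the trailing count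
import Mathlib
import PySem

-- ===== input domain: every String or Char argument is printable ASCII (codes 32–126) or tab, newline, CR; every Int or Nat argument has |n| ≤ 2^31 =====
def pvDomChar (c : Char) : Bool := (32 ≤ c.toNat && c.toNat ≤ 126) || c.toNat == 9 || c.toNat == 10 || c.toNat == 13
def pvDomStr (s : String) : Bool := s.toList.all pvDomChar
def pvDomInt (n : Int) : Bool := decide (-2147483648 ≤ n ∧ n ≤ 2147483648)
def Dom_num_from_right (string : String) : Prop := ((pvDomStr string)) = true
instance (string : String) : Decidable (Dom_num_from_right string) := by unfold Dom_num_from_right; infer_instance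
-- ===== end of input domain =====

-- B replaces A's right-to-left index loop with break by a forward pass keeping the current run of matching characters (alternative decomposition, same cost).

-- ===== PORT A =====
-- the loop 'for i in range(len(string)-1,-1,-1): … else break' as structural recursion over the index list
def numFromRightLoop (s : String) : List Int → Int → Int
  | [], num => num
  | i :: rest, num =>
    match PySem.Str.pyGet? s i with
    | some c =>
        -- Python "c in '. 0123456789'" for a single character = membership in the character list (exact)
        if (". 0123456789".toList.contains c) then numFromRightLoop s rest (num + 1)
        else num
    | none => num   -- IndexError: unreachable, every generated index is in range

def num_from_right (string : String) : Int :=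
  numFromRightLoop string (PySem.List.pyRange (PySem.Str.len string - 1) (-1) (-1)) 0

-- ===== PORT B =====
-- forward pass over the characters, run resets to 0 on a non-matching character
def num_from_right_alt (string : String) : Int :=
  string.toList.foldl
    (fun run c => if (". 0123456789".toList.contains c) then run + 1 else 0) 0

-- ===== PRECONDITION & SPEC =====
def Spec_num_from_right (string : String) (out : Int) : Prop := out = num_from_right_alt string
instance (string : String) (out : Int) : Decidable (Spec_num_from_right string out) := by unfold Spec_num_from_right; infer_instance

-- ===== CLAIM (what is proved, stated in full; the proofs are below) =====
def Claim_equal_num_from_right : Prop := ∀ (string : String), Dom_num_from_right string → Spec_num_from_right string (num_from_right string)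

-- ===== LEMMAS AND PROOFS =====

-- A's loop over the indices k-1, k-2, …, 0 counts the trailing matching run of the first k characters
lemma numFromRightLoop_eq (s : String) (k : Nat) (hk : k ≤ s.toList.length) (num : Int) :
    numFromRightLoop s (PySem.List.pyRange ((k : Int) - 1) (-1) (-1)) num
      = num + (((s.toList.take k).reverse.takeWhile
          (fun c => (". 0123456789".toList.contains c))).length : Int) := by
  induction k generalizing num with
  | zero =>
      rw [PySem.List.pyRange_neg_one_eq_nil (by norm_num)]
      simp [numFromRightLoop]
  | succ k ih =>
      rw [show (((k+1 : Nat) : Int) - 1) = (k : Int) by push_cast; ring,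
          PySem.List.pyRange_neg_one_cons (by omega : (-1 : Int) < (k : Int))]
      have hlt : k < s.toList.length := by omega
      have hget : PySem.Str.pyGet? s (k : Int) = some (s.toList[k]) := by
        simp [List.getElem?_eq_getElem hlt]
      have htake : (s.toList.take (k+1)).reverse = s.toList[k] :: (s.toList.take k).reverse := by
        rw [List.take_add_one, List.getElem?_eq_getElem hlt]
        simp
      simp only [numFromRightLoop, hget, htake]
      by_cases hc : (". 0123456789".toList.contains (s.toList[k])) = true
      · rw [if_pos hc]
        rw [ih (by omega) (num + 1)]
        rw [List.takeWhile_cons_of_pos hc]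
        simp only [List.length_cons]
        push_cast
        ring
      · rw [if_neg hc]
        rw [List.takeWhile_cons_of_neg (by simpa using hc)]
        simp

-- B's forward resetting fold computes the trailing matching run of the list
lemma foldl_run_eq (l : List Char) :
    l.foldl (fun run c => if (". 0123456789".toList.contains c) then run + 1 else 0) 0
      = ((l.reverse.takeWhile (fun c => (". 0123456789".toList.contains c))).length : Int) := by
  induction l using List.reverseRecOn with
  | nil => simp
  | append_singleton l c ih =>
      rw [List.foldl_append, List.foldl_cons, List.foldl_nil, List.reverse_append]
      simp only [List.reverse_cons, List.reverse_nil, List.nil_append, List.singleton_append]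
      by_cases hc : (". 0123456789".toList.contains c) = true
      · rw [if_pos hc, ih, List.takeWhile_cons_of_pos hc]
        simp only [List.length_cons]
        push_cast; ring
      · rw [if_neg hc, List.takeWhile_cons_of_neg (by simpa using hc)]
        simp

-- ===== VERDICT (by name: the statement is the Claim_ definition above) =====
theorem num_from_right_spec : Claim_equal_num_from_right := by
  intro s _
  unfold Spec_num_from_right num_from_right num_from_right_alt
  rw [foldl_run_eq]
  have := numFromRightLoop_eq s s.toList.length le_rfl 0
  simp only [List.take_length] at this
  have hlen : PySem.Str.len s - 1 = ((s.toList.length : Int) - 1) := by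
    simp [PySem.Str.len_eq]
  rw [hlen, this]
  simp
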